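-- pv_equiv track=rewrite | github.com/marekacper/stockr | services/prices.py | to_yf_ticker
-- ===== SOURCE A (Python) =====
-- def to_yf_ticker(ticker: str) -> str:
--     """Tłumaczy ticker z formatu XTB na format yfinance."""
--     mapping = {
--         # Giełda frankfurcka
--         ".DE": ".DE",    # Frankfurt — zostawiamy bez zmian
--         # GPW Warszawa
--         ".PL": ".WA",
--         # Londyn
--         ".UK": ".L",
--     }
--     for suffix, replacement in mapping.items():
--         if ticker.endswith(suffix):
--             return ticker[:-len(suffix)] + replacement
--     return ticker
-- ===== SOURCE B (Python) =====
-- _SUFFIX_MAP = {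
--     ".DE": ".DE",  # Frankfurt - unchanged
--     ".PL": ".WA",  # GPW Warsaw
--     ".UK": ".L",   # London
-- }
--
--
-- def to_yf_ticker(ticker: str) -> str:
--     """Tłumaczy ticker z formatu XTB na format yfinance."""
--     i = ticker.rfind(".")
--     if i == -1:
--         return ticker
--     replacement = _SUFFIX_MAP.get(ticker[i:])
--     if replacement is None:
--         return ticker
--     return ticker[:i] + replacement
-- ===== Notes on version B (the rewrite author's own statement) =====
-- stated objective: idiomatic
-- what changed: Instead of scanning the whole mapping with an endswith test per entry, B locates the last dot once with rfind and does a single dict lookup of that trailing suffix.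
import Mathlib
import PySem

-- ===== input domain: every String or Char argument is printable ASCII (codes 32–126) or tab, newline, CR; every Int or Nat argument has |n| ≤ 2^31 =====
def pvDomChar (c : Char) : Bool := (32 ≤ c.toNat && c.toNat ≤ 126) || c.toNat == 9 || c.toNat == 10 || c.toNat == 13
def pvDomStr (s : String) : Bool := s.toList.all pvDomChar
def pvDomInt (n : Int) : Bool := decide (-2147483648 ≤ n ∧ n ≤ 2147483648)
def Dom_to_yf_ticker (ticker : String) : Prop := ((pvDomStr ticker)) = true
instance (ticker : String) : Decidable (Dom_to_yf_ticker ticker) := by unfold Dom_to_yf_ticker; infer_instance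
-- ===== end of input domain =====

-- B replaces A's scan of the whole mapping (one endswith test per entry) by locating the last
-- dot once with rfind and doing a single dict lookup of the trailing suffix (objective: idiomatic).
-- Python 'x + y' on str is ported exactly as String.ofList (x.toList ++ y.toList).

-- ===== PORT A =====
-- A's dict literal 'mapping', iterated in insertion order by 'for suffix, replacement in mapping.items()'
def pvMapItems : List (String × String) := [(".DE", ".DE"), (".PL", ".WA"), (".UK", ".L")]

-- the for-loop of A: first entry whose suffix matches wins, ticker[:-len(suffix)] + replacement
def toYfLoop (ticker : String) : List (String × String) → String
  | [] => ticker
  | (suffix, replacement) :: rest =>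
      if PySem.Str.endswith ticker suffix then
        String.ofList ((PySem.Str.slice ticker none (some (-(PySem.Str.len suffix)))).toList
          ++ replacement.toList)
      else toYfLoop ticker rest

def to_yf_ticker (ticker : String) : String := toYfLoop ticker pvMapItems

-- ===== PORT B =====
-- B's module-level dict _SUFFIX_MAP
def pvSuffixMap : PySem.Dict String String :=
  PySem.Dict.ofList [(".DE", ".DE"), (".PL", ".WA"), (".UK", ".L")]

-- the body of B after 'i = ticker.rfind(".")': early returns become the if/match chain
def altAfterFind (ticker : String) (i : Int) : String :=
  if i = -1 then ticker
  else
    match PySem.Dict.get? pvSuffixMap (PySem.Str.slice ticker (some i) none) with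
    | none => ticker
    | some replacement =>
        String.ofList ((PySem.Str.slice ticker none (some i)).toList ++ replacement.toList)

def to_yf_ticker_alt (ticker : String) : String :=
  altAfterFind ticker (PySem.Str.rfind ticker ".")

-- ===== PRECONDITION & SPEC =====
def Spec_to_yf_ticker (ticker : String) (out : String) : Prop := out = to_yf_ticker_alt ticker
instance (ticker : String) (out : String) : Decidable (Spec_to_yf_ticker ticker out) := by unfold Spec_to_yf_ticker; infer_instance

-- ===== CLAIM (what is proved, stated in full; the proofs are below) =====
def Claim_equal_to_yf_ticker : Prop := ∀ (ticker : String), Dom_to_yf_ticker ticker → Spec_to_yf_ticker ticker (to_yf_ticker ticker)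

-- ===== LEMMAS AND PROOFS =====

theorem isPrefixOf_dot (l : List Char) :
    (['.'] : List Char).isPrefixOf l = true ↔ l.head? = some '.' := by
  cases l with
  | nil => simp [List.isPrefixOf]
  | cons a t =>
      simp only [List.isPrefixOf, List.head?_cons, Option.some.injEq, Bool.and_true, beq_iff_eq]
      exact ⟨fun h => h.symm, fun h => h.symm⟩

theorem rfind_go_no_dot (s : List Char) (h : '.' ∉ s) (k : Nat) :
    PySem.Chars.rfind.go s ['.'] k = -1 := by
  induction k with
  | zero =>
      simp only [PySem.Chars.rfind.go]
      rw [if_neg]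
      intro hp
      rw [isPrefixOf_dot] at hp
      exact h (List.mem_of_mem_head? hp)
  | succ j ih =>
      simp only [PySem.Chars.rfind.go]
      rw [if_neg, ih]
      intro hp
      rw [isPrefixOf_dot, List.head?_drop] at hp
      exact h (List.mem_of_getElem? hp)

theorem rfind_go_last (P Q : List Char) (hQ : '.' ∉ Q) :
    ∀ (k : Nat), P.length ≤ k → PySem.Chars.rfind.go (P ++ '.' :: Q) ['.'] k = (P.length : Int) := by
  intro k
  induction k with
  | zero =>
      intro hk
      have hP0 : P = [] := List.eq_nil_of_length_eq_zero (Nat.le_zero.mp hk)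
      subst hP0
      simp only [PySem.Chars.rfind.go, List.nil_append]
      rw [if_pos (by rw [isPrefixOf_dot]; rfl)]
      simp
  | succ j ih =>
      intro hk
      rcases Nat.lt_or_ge j.succ P.length.succ with hlt | hge
      · -- P.length = j + 1 : the prefix test succeeds right here
        have hPj : P.length = j + 1 := Nat.le_antisymm hk (Nat.lt_succ_iff.mp hlt)
        have hc : (['.'] : List Char).isPrefixOf (List.drop (j + 1) (P ++ '.' :: Q)) = true := by
          rw [isPrefixOf_dot, List.head?_drop, List.getElem?_append_right (by omega)]
          simp [hPj]
        simp only [PySem.Chars.rfind.go]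
        rw [if_pos hc]
        omega
      · -- j + 1 > P.length : position j+1 lies inside Q, which has no dot; recurse
        have hle : P.length ≤ j := Nat.lt_succ_iff.mp hge
        have hc : ¬ (['.'] : List Char).isPrefixOf (List.drop (j + 1) (P ++ '.' :: Q)) = true := by
          intro hp
          rw [isPrefixOf_dot, List.head?_drop, List.getElem?_append_right (by omega)] at hp
          have hj : j + 1 - P.length = (j - P.length) + 1 := by omega
          rw [hj] at hp
          simp only [List.getElem?_cons_succ] at hp
          exact hQ (List.mem_of_getElem? hp)
        simp only [PySem.Chars.rfind.go]
        rw [if_neg hc]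
        exact ih hle

theorem rfind_no_dot (L : List Char) (h : '.' ∉ L) : PySem.Chars.rfind L ['.'] = -1 :=
  rfind_go_no_dot L h L.length

theorem rfind_last_dot (P Q : List Char) (hQ : '.' ∉ Q) :
    PySem.Chars.rfind (P ++ '.' :: Q) ['.'] = (P.length : Int) :=
  rfind_go_last P Q hQ (P ++ '.' :: Q).length (by simp)

-- split a list at the LAST occurrence of c
theorem last_split {c : Char} {l : List Char} (h : c ∈ l) :
    ∃ P Q, l = P ++ c :: Q ∧ c ∉ Q := by
  induction l with
  | nil => cases h
  | cons a t ih =>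
      by_cases ht : c ∈ t
      · obtain ⟨P, Q, hPQ, hQ⟩ := ih ht
        exact ⟨a :: P, Q, by rw [hPQ]; rfl, hQ⟩
      · have hca : c = a := by cases h with | head => rfl | tail _ h' => exact absurd h' ht
        exact ⟨[], t, by simp [hca], ht⟩

theorem slice_from_nat (ticker : String) (n : Nat) :
    (PySem.Str.slice ticker (some (n : Int)) none).toList = ticker.toList.drop n := by
  rw [PySem.Str.toList_slice, PySem.Chars.slice_eq_listSlice, PySem.List.slice_from_natCast]

theorem slice_to_nat (ticker : String) (n : Nat) :
    (PySem.Str.slice ticker none (some (n : Int))).toList = ticker.toList.take n := by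
  rw [PySem.Str.toList_slice, PySem.Chars.slice_eq_listSlice, PySem.List.slice_to_natCast]

theorem slice_to_neg3 (ticker : String) :
    (PySem.Str.slice ticker none (some (-3))).toList
      = ticker.toList.take (ticker.toList.length - 3) := by
  rw [PySem.Str.toList_slice, PySem.Chars.slice_eq_listSlice,
    PySem.List.slice_to_neg_ofNat _ 3 (by omega)]

theorem endswith_iff_str (ticker suf : String) :
    PySem.Str.endswith ticker suf = true ↔ suf.toList <:+ ticker.toList := by
  rw [PySem.Str.endswith_eq, PySem.Chars.endswith_iff]

theorem toYfLoop_cons (ticker suffix replacement : String) (rest : List (String × String)) :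
    toYfLoop ticker ((suffix, replacement) :: rest)
      = if PySem.Str.endswith ticker suffix then
          String.ofList ((PySem.Str.slice ticker none (some (-(PySem.Str.len suffix)))).toList
            ++ replacement.toList)
        else toYfLoop ticker rest := rfl

theorem get?_map_none (s : String) (h1 : s ≠ ".DE") (h2 : s ≠ ".PL") (h3 : s ≠ ".UK") :
    PySem.Dict.get? pvSuffixMap s = none := by
  simp [pvSuffixMap, PySem.Dict.ofList, PySem.Dict.get?, PySem.Dict.update, PySem.Dict.empty,
    PySem.Dict.insert]
  exact ⟨Ne.symm h1, Ne.symm h2, Ne.symm h3⟩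

-- the common "ticker ends with '.'c1c2" computation on B's side
theorem hit_case (ticker : String) (P : List Char) (c1 c2 : Char)
    (h1 : c1 ≠ '.') (h2 : c2 ≠ '.') (hL : ticker.toList = P ++ ['.', c1, c2]) (rep : String)
    (hget : PySem.Dict.get? pvSuffixMap (String.ofList ['.', c1, c2]) = some rep) :
    to_yf_ticker_alt ticker = String.ofList (P ++ rep.toList) := by
  have hrf : PySem.Str.rfind ticker "." = (P.length : Int) := by
    rw [PySem.Str.rfind_eq, hL]
    exact rfind_last_dot P [c1, c2] (by simp [Ne.symm h1, Ne.symm h2])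
  have hkey : PySem.Str.slice ticker (some (P.length : Int)) none = String.ofList ['.', c1, c2] := by
    apply String.toList_inj.mp
    rw [slice_from_nat, hL, List.drop_left, String.toList_ofList]
  have htake : (PySem.Str.slice ticker none (some (P.length : Int))).toList = P := by
    rw [slice_to_nat, hL, List.take_left]
  unfold to_yf_ticker_alt altAfterFind
  rw [hrf, if_neg (by omega), hkey, hget, htake]

-- the matched-entry value on A's side, for a 3-character suffix
theorem a_hit (ticker suf rep : String) (P : List Char)
    (hlen : PySem.Str.len suf = 3)
    (hL : ticker.toList = P ++ suf.toList) (hsuf : suf.toList.length = 3) :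
    String.ofList ((PySem.Str.slice ticker none (some (-(PySem.Str.len suf)))).toList ++ rep.toList)
      = String.ofList (P ++ rep.toList) := by
  rw [hlen]
  have hp : (PySem.Str.slice ticker none (some (-3))).toList = P := by
    rw [slice_to_neg3, hL]
    have hlp : (P ++ suf.toList).length - 3 = P.length := by simp [hsuf]
    rw [hlp, List.take_left]
  rw [hp]

theorem main_equiv (ticker : String) : to_yf_ticker ticker = to_yf_ticker_alt ticker := by
  rw [show to_yf_ticker ticker
        = toYfLoop ticker [(".DE", ".DE"), (".PL", ".WA"), (".UK", ".L")] from rfl]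
  rw [toYfLoop_cons]
  by_cases hDE : PySem.Str.endswith ticker ".DE" = true
  · obtain ⟨P, hP⟩ := (endswith_iff_str ticker ".DE").mp hDE
    have hL : ticker.toList = P ++ ['.', 'D', 'E'] := hP.symm
    rw [if_pos hDE, a_hit ticker ".DE" ".DE" P (by decide) hL (by decide),
      hit_case ticker P 'D' 'E' (by decide) (by decide) hL ".DE" (by decide)]
  · rw [if_neg hDE, toYfLoop_cons]
    by_cases hPL : PySem.Str.endswith ticker ".PL" = true
    · obtain ⟨P, hP⟩ := (endswith_iff_str ticker ".PL").mp hPL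
      have hL : ticker.toList = P ++ ['.', 'P', 'L'] := hP.symm
      rw [if_pos hPL, a_hit ticker ".PL" ".WA" P (by decide) hL (by decide),
        hit_case ticker P 'P' 'L' (by decide) (by decide) hL ".WA" (by decide)]
    · rw [if_neg hPL, toYfLoop_cons]
      by_cases hUK : PySem.Str.endswith ticker ".UK" = true
      · obtain ⟨P, hP⟩ := (endswith_iff_str ticker ".UK").mp hUK
        have hL : ticker.toList = P ++ ['.', 'U', 'K'] := hP.symm
        rw [if_pos hUK, a_hit ticker ".UK" ".L" P (by decide) hL (by decide),
          hit_case ticker P 'U' 'K' (by decide) (by decide) hL ".L" (by decide)]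
      · -- no mapping suffix matches: A returns ticker; show B does too
        rw [if_neg hUK, show toYfLoop ticker [] = ticker from rfl]
        by_cases hmem : '.' ∈ ticker.toList
        · obtain ⟨P, Q, hPQ, hQ⟩ := last_split hmem
          have hrf : PySem.Str.rfind ticker "." = (P.length : Int) := by
            rw [PySem.Str.rfind_eq, hPQ]
            exact rfind_last_dot P Q hQ
          have hkey : (PySem.Str.slice ticker (some (P.length : Int)) none).toList = '.' :: Q := by
            rw [slice_from_nat, hPQ, List.drop_left]
          have hne : ∀ (suf : String), PySem.Str.endswith ticker suf ≠ true →
              PySem.Str.slice ticker (some (P.length : Int)) none ≠ suf := by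
            intro suf hnsuf heq
            apply hnsuf
            rw [endswith_iff_str]
            exact ⟨P, by rw [← heq, hkey, hPQ]⟩
          unfold to_yf_ticker_alt altAfterFind
          rw [hrf, if_neg (by omega), get?_map_none _ (hne ".DE" hDE) (hne ".PL" hPL)
            (hne ".UK" hUK)]
        · have hrf : PySem.Str.rfind ticker "." = -1 := by
            rw [PySem.Str.rfind_eq]; exact rfind_no_dot _ hmem
          unfold to_yf_ticker_alt altAfterFind
          rw [hrf, if_pos rfl]

-- ===== VERDICT (by name: the statement is the Claim_ definition above) =====
theorem to_yf_ticker_spec : Claim_equal_to_yf_ticker := by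
  intro ticker _
  show to_yf_ticker ticker = to_yf_ticker_alt ticker
  exact main_equiv ticker
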